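-- pv_equiv track=rewrite | github.com/VishwamAI/ProtienFlex | models/generative/text_to_protein_generator.py | _sequences_match_pattern
-- ===== SOURCE A (Python) =====
-- def _sequences_match_pattern(seq1: str, seq2: str) -> bool:
--     """Check if sequences match allowing for conservative substitutions."""
--     if len(seq1) != len(seq2):
--         return False
--
--     # Define groups of similar amino acids
--     similar_groups = [
--         set('ILVM'),     # Aliphatic
--         set('FYW'),      # Aromatic
--         set('KRH'),      # Basic
--         set('DE'),       # Acidic
--         set('STNQ'),     # Polar
--         set('AG'),       # Small
--         set('PG')        # Special
--     ]
--
--     for a1, a2 in zip(seq1, seq2):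
--         if a1 == a2:
--             continue
--         # Check if amino acids are in the same group
--         is_similar = any(a1 in group and a2 in group for group in similar_groups)
--         if not is_similar:
--             return False
--     return True
-- ===== SOURCE B (Python) =====
-- # B: precompute a neighbor table (amino acid -> set of conservative substitutes) once,
-- # then a single all(...) with one lookup per position; simpler/idiomatic, no per-position group scan.
--
-- _GROUPS = ['ILVM', 'FYW', 'KRH', 'DE', 'STNQ', 'AG', 'PG']
--
-- _NEIGHBORS = {}
-- for _group in _GROUPS:
--     for _a in _group:
--         for _b in _group:
--             if _a != _b:
--                 _NEIGHBORS.setdefault(_a, set()).add(_b)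
--
--
-- def _sequences_match_pattern(seq1: str, seq2: str) -> bool:
--     if len(seq1) != len(seq2):
--         return False
--     return all(a == b or b in _NEIGHBORS.get(a, set()) for a, b in zip(seq1, seq2))
-- ===== Notes on version B (the rewrite author's own statement) =====
-- stated objective: simpler
-- what changed: B precomputes once a neighbor table mapping each amino acid to the set of residues it may conservatively substitute with (adding every distinct within-group pair of the 7 groups), then checks each zipped position with a single table lookup inside one all(...), removing A's per-position scan over all 7 groups.
import Mathlib
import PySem

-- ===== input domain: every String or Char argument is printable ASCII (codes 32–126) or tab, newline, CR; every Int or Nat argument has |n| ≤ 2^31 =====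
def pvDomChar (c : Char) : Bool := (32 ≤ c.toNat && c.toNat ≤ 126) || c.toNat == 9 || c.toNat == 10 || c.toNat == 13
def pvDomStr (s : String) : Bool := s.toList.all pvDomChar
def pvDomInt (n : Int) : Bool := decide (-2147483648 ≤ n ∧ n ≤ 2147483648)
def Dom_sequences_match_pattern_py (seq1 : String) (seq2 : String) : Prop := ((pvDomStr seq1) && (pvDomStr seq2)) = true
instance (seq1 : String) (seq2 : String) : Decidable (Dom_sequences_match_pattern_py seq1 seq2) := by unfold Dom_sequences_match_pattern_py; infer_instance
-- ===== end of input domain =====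

-- B replaces A's per-position scan over the 7 similarity groups by one lookup in a
-- neighbor table (amino acid -> set of conservative substitutes) precomputed once: simpler/idiomatic, same result.

-- ===== PORT A =====
-- the 7 'similar_groups' sets, as in A
def pyGroups : List (PySem.Set Char) :=
  [PySem.Set.ofList "ILVM".toList, PySem.Set.ofList "FYW".toList, PySem.Set.ofList "KRH".toList,
   PySem.Set.ofList "DE".toList, PySem.Set.ofList "STNQ".toList, PySem.Set.ofList "AG".toList,
   PySem.Set.ofList "PG".toList]

-- A's 'for a1, a2 in zip(seq1, seq2)' loop with its early 'return False'
def pyLoopA : List (Char × Char) → Bool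
  | [] => true
  | (a1, a2) :: rest =>
    if a1 == a2 then pyLoopA rest
    else
      if pyGroups.any (fun g => PySem.Set.contains g a1 && PySem.Set.contains g a2) then pyLoopA rest
      else false

def sequences_match_pattern_py (seq1 : String) (seq2 : String) : Bool :=
  if PySem.Str.len seq1 ≠ PySem.Str.len seq2 then false
  else pyLoopA (seq1.toList.zip seq2.toList)

-- ===== PORT B =====
-- Source B's module-level table build: groups, then the nested 'setdefault(a, set()).add(b)' loops
def altGroups : List (List Char) :=
  ["ILVM".toList, "FYW".toList, "KRH".toList, "DE".toList, "STNQ".toList, "AG".toList, "PG".toList]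

def altNeighbors : PySem.Dict Char (PySem.Set Char) :=
  altGroups.foldl (fun d g =>
    g.foldl (fun d a =>
      g.foldl (fun d b =>
        if a ≠ b then d.insert a (PySem.Set.add (d.getD a PySem.Set.empty) b) else d) d) d)
    PySem.Dict.empty

def sequences_match_pattern_py_alt (seq1 : String) (seq2 : String) : Bool :=
  if PySem.Str.len seq1 ≠ PySem.Str.len seq2 then false
  else (seq1.toList.zip seq2.toList).all
    (fun p => p.1 == p.2 || PySem.Set.contains (altNeighbors.getD p.1 PySem.Set.empty) p.2)

-- ===== PRECONDITION & SPEC =====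
def Spec_sequences_match_pattern_py (seq1 : String) (seq2 : String) (out : Bool) : Prop := out = sequences_match_pattern_py_alt seq1 seq2
instance (seq1 : String) (seq2 : String) (out : Bool) : Decidable (Spec_sequences_match_pattern_py seq1 seq2 out) := by unfold Spec_sequences_match_pattern_py; infer_instance

-- ===== CLAIM (what is proved, stated in full; the proofs are below) =====
def Claim_equal_sequences_match_pattern_py : Prop := ∀ (seq1 : String) (seq2 : String), Dom_sequences_match_pattern_py seq1 seq2 → Spec_sequences_match_pattern_py seq1 seq2 (sequences_match_pattern_py seq1 seq2)

-- ===== LEMMAS AND PROOFS =====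

-- the 19 amino acids occurring in the groups (for case analysis)
def pvAA : List Char := ['I','L','V','M','F','Y','W','K','R','H','D','E','S','T','N','Q','A','G','P']

-- the neighbor table, fully evaluated (closed computation)
set_option maxRecDepth 100000 in
lemma altNeighbors_eval : altNeighbors = PySem.Dict.mk
    [('I', ['L', 'V', 'M']), ('L', ['I', 'V', 'M']), ('V', ['I', 'L', 'M']), ('M', ['I', 'L', 'V']),
     ('F', ['Y', 'W']), ('Y', ['F', 'W']), ('W', ['F', 'Y']), ('K', ['R', 'H']), ('R', ['K', 'H']),
     ('H', ['K', 'R']), ('D', ['E']), ('E', ['D']), ('S', ['T', 'N', 'Q']), ('T', ['S', 'N', 'Q']),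
     ('N', ['S', 'T', 'Q']), ('Q', ['S', 'T', 'N']), ('A', ['G']), ('G', ['A', 'P']), ('P', ['G'])] := by
  decide

-- core fact: for distinct residues, "some group contains both" = "b is in a's neighbor set"
set_option maxHeartbeats 4000000 in
set_option maxRecDepth 20000 in
lemma sim_eq (a b : Char) (hne : a ≠ b) :
    pyGroups.any (fun g => PySem.Set.contains g a && PySem.Set.contains g b)
      = PySem.Set.contains (altNeighbors.getD a PySem.Set.empty) b := by
  rw [altNeighbors_eval]
  by_cases hb : b ∈ pvAA
  · by_cases ha : a ∈ pvAA
    · fin_cases ha <;> fin_cases hb <;> first | decide | (exact absurd rfl hne)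
    · simp only [pvAA, List.mem_cons, not_or] at ha
      obtain ⟨h1,h2,h3,h4,h5,h6,h7,h8,h9,h10,h11,h12,h13,h14,h15,h16,h17,h18,h19⟩ := ha
      simp [pyGroups, PySem.Set.contains, PySem.Set.ofList, PySem.Set.add,
        PySem.Dict.getD, PySem.Dict.get?, List.find?,
        h1,h2,h3,h4,h5,h6,h7,h8,h9,h10,h11,h12,h13,h14,h15,h16,h17,h18,h19.1,
        beq_eq_false_iff_ne.mpr (Ne.symm h1),beq_eq_false_iff_ne.mpr (Ne.symm h2),
        beq_eq_false_iff_ne.mpr (Ne.symm h3),beq_eq_false_iff_ne.mpr (Ne.symm h4),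
        beq_eq_false_iff_ne.mpr (Ne.symm h5),beq_eq_false_iff_ne.mpr (Ne.symm h6),
        beq_eq_false_iff_ne.mpr (Ne.symm h7),beq_eq_false_iff_ne.mpr (Ne.symm h8),
        beq_eq_false_iff_ne.mpr (Ne.symm h9),beq_eq_false_iff_ne.mpr (Ne.symm h10),
        beq_eq_false_iff_ne.mpr (Ne.symm h11),beq_eq_false_iff_ne.mpr (Ne.symm h12),
        beq_eq_false_iff_ne.mpr (Ne.symm h13),beq_eq_false_iff_ne.mpr (Ne.symm h14),
        beq_eq_false_iff_ne.mpr (Ne.symm h15),beq_eq_false_iff_ne.mpr (Ne.symm h16),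
        beq_eq_false_iff_ne.mpr (Ne.symm h17),beq_eq_false_iff_ne.mpr (Ne.symm h18),
        beq_eq_false_iff_ne.mpr (Ne.symm h19.1)]
  · by_cases ha : a ∈ pvAA
    · simp only [pvAA, List.mem_cons, not_or] at hb
      obtain ⟨h1,h2,h3,h4,h5,h6,h7,h8,h9,h10,h11,h12,h13,h14,h15,h16,h17,h18,h19⟩ := hb
      fin_cases ha <;>
        simp [pyGroups, PySem.Set.contains, PySem.Set.ofList, PySem.Set.add,
          PySem.Dict.getD, PySem.Dict.get?, List.find?,
          h1,h2,h3,h4,h5,h6,h7,h8,h9,h10,h11,h12,h13,h14,h15,h16,h17,h18,h19.1]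
    · simp only [pvAA, List.mem_cons, not_or] at ha hb
      obtain ⟨g1,g2,g3,g4,g5,g6,g7,g8,g9,g10,g11,g12,g13,g14,g15,g16,g17,g18,g19⟩ := ha
      obtain ⟨h1,h2,h3,h4,h5,h6,h7,h8,h9,h10,h11,h12,h13,h14,h15,h16,h17,h18,h19⟩ := hb
      simp [pyGroups, PySem.Set.contains, PySem.Set.ofList, PySem.Set.add,
        PySem.Dict.getD, PySem.Dict.get?, List.find?,
        g1,g2,g3,g4,g5,g6,g7,g8,g9,g10,g11,g12,g13,g14,g15,g16,g17,g18,g19.1,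
        h1,h2,h3,h4,h5,h6,h7,h8,h9,h10,h11,h12,h13,h14,h15,h16,h17,h18,h19.1,
        beq_eq_false_iff_ne.mpr (Ne.symm g1),beq_eq_false_iff_ne.mpr (Ne.symm g2),
        beq_eq_false_iff_ne.mpr (Ne.symm g3),beq_eq_false_iff_ne.mpr (Ne.symm g4),
        beq_eq_false_iff_ne.mpr (Ne.symm g5),beq_eq_false_iff_ne.mpr (Ne.symm g6),
        beq_eq_false_iff_ne.mpr (Ne.symm g7),beq_eq_false_iff_ne.mpr (Ne.symm g8),
        beq_eq_false_iff_ne.mpr (Ne.symm g9),beq_eq_false_iff_ne.mpr (Ne.symm g10),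
        beq_eq_false_iff_ne.mpr (Ne.symm g11),beq_eq_false_iff_ne.mpr (Ne.symm g12),
        beq_eq_false_iff_ne.mpr (Ne.symm g13),beq_eq_false_iff_ne.mpr (Ne.symm g14),
        beq_eq_false_iff_ne.mpr (Ne.symm g15),beq_eq_false_iff_ne.mpr (Ne.symm g16),
        beq_eq_false_iff_ne.mpr (Ne.symm g17),beq_eq_false_iff_ne.mpr (Ne.symm g18),
        beq_eq_false_iff_ne.mpr (Ne.symm g19.1)]

-- A's early-exit loop = B's all(...) over the same zipped pairs
lemma pyLoopA_eq_all (l : List (Char × Char)) :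
    pyLoopA l = l.all
      (fun p => p.1 == p.2 || PySem.Set.contains (altNeighbors.getD p.1 PySem.Set.empty) p.2) := by
  induction l with
  | nil => rfl
  | cons p rest ih =>
    obtain ⟨a, b⟩ := p
    by_cases hab : a = b
    · subst hab
      simp [pyLoopA, ih]
    · rw [show pyLoopA ((a, b) :: rest)
            = (if pyGroups.any (fun g => PySem.Set.contains g a && PySem.Set.contains g b)
               then pyLoopA rest else false) from by
          simp [pyLoopA, beq_eq_false_iff_ne.mpr hab]]
      rw [sim_eq a b hab]
      simp [beq_eq_false_iff_ne.mpr hab, ih]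

-- ===== VERDICT (by name: the statement is the Claim_ definition above) =====
theorem sequences_match_pattern_py_spec : Claim_equal_sequences_match_pattern_py := by
  intro seq1 seq2 _
  unfold Spec_sequences_match_pattern_py sequences_match_pattern_py sequences_match_pattern_py_alt
  split_ifs with h
  · rfl
  · exact pyLoopA_eq_all _
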